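-- pv_equiv track=rewrite | github.com/Shamrock13/flintlock | src/cashel/paloalto.py | expand_address
-- ===== SOURCE A (Python) =====
-- _BROAD_VALUES = {"any", "all", "*"}
--
-- def _normalize_broad(value):
--     text = (value or "").strip()
--     if text.lower() in _BROAD_VALUES:
--         return "any"
--     return text
--
-- def _stable_unique(values):
--     seen = set()
--     output = []
--     for value in values:
--         if value not in seen:
--             seen.add(value)
--             output.append(value)
--     return sorted(output)
--
-- def expand_address(name, objects, groups, _seen=None):
--     """Expand a Palo Alto address object or static group into deterministic values."""
--     normalized = _normalize_broad(name)
--     if normalized == "any":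
--         return ["any"]
--
--     seen = set() if _seen is None else set(_seen)
--     if normalized in seen:
--         return []
--     seen.add(normalized)
--
--     if normalized in groups:
--         members = groups[normalized].get("members", [])
--         return _stable_unique(
--             value
--             for member in members
--             for value in expand_address(member, objects, groups, seen)
--         )
--
--     if normalized in objects:
--         obj = objects[normalized]
--         for key in ("ip-netmask", "fqdn", "ip-range"):
--             if obj.get(key):
--                 return [obj[key]]
--         return [normalized]
--
--     return [normalized]
-- ===== SOURCE B (Python) =====
-- _BROAD_VALUES = {"any", "all", "*"}
--
--
-- def _norm(value):
--     text = (value or "").strip()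
--     return "any" if text.lower() in _BROAD_VALUES else text
--
--
-- def _resolve_leaf(node, objects):
--     obj = objects.get(node)
--     if obj is not None:
--         for key in ("ip-netmask", "fqdn", "ip-range"):
--             if obj.get(key):
--                 return obj[key]
--     return node
--
--
-- def _members(groups, g):
--     return groups.get(g, {}).get("members", [])
--
--
-- def expand_address(name, objects, groups, _seen=None):
--     """Expand an address object or static group into deterministic values.
--
--     Instead of recursing with a copied path set, compute the set of reachable
--     groups once by bounded closure iteration, then collect each reachable
--     group's direct leaf values.
--     """
--     root = _norm(name)
--     if root == "any":
--         return ["any"]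
--     blocked = set() if _seen is None else set(_seen)
--     if root in blocked:
--         return []
--     if root not in groups:
--         return [_resolve_leaf(root, objects)]
--     reached = {root}
--     for _ in range(len(groups) + 1):
--         step = {
--             nm
--             for g in reached
--             for m in _members(groups, g)
--             for nm in (_norm(m),)
--             if nm != "any" and nm not in blocked and nm in groups
--         }
--         reached |= step
--     values = set()
--     for g in reached:
--         for m in _members(groups, g):
--             nm = _norm(m)
--             if nm == "any":
--                 values.add("any")
--             elif nm not in blocked and nm not in groups:
--                 values.add(_resolve_leaf(nm, objects))
--     return sorted(values)
-- ===== Notes on version B (the rewrite author's own statement) =====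
-- stated objective: alternative
-- what changed: A expands every group member by recursion carrying a copied path set, re-expanding shared sub-graphs; B instead computes the set of reachable groups once by bounded closure iteration over the group graph and then collects each reachable group's direct leaf values in one pass, returning the same sorted-unique list.
import Mathlib
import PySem

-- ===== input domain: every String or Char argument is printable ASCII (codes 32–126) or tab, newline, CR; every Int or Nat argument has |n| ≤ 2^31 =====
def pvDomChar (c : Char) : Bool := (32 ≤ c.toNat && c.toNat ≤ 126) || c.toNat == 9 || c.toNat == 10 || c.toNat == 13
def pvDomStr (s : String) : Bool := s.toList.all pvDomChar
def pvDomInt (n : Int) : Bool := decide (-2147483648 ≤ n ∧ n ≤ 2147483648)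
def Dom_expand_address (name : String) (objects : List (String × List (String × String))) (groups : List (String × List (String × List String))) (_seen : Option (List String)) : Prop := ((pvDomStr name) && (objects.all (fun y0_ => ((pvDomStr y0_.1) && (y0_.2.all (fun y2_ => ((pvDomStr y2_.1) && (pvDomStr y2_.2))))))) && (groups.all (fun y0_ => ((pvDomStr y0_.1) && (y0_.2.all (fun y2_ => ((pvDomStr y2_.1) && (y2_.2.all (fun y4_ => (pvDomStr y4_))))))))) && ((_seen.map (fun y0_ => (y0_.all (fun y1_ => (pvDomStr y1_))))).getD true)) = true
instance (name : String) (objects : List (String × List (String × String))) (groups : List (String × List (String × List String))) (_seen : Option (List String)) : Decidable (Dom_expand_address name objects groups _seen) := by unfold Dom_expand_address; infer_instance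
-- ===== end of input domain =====

-- B replaces A's path-set recursion by a one-time reachable-group closure plus a single
-- leaf-collection pass (a different algorithm of similar cost); same return value.

-- ===== PORT A =====
-- helpers the port of A needs for its termination measure (number of group keys not yet in `seen`)
def pvKeysLeft (groups : List (String × List (String × List String))) (seen : List String) : Nat :=
  ((groups.map Prod.fst).filter (fun k => decide (k ∉ seen))).length

theorem pvFilter_append_lt (l : List String) (seen : List String) (n : String)
    (hn : n ∈ l) (hns : n ∉ seen) :
    (l.filter (fun k => decide (k ∉ seen ++ [n]))).length
      < (l.filter (fun k => decide (k ∉ seen))).length := by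
  induction l with
  | nil => cases hn
  | cons x xs ih =>
    have hmono : ∀ ys : List String,
        (ys.filter (fun k => decide (k ∉ seen ++ [n]))).length
          ≤ (ys.filter (fun k => decide (k ∉ seen))).length := by
      intro ys
      apply List.Sublist.length_le
      apply List.monotone_filter_right
      intro a ha
      simp only [decide_eq_true_eq, List.mem_append, List.mem_singleton] at ha ⊢
      intro hmem; exact ha (Or.inl hmem)
    rcases eq_or_ne x n with rfl | hxn
    · have h1 : (decide (x ∉ seen ++ [x])) = false := by simp
      have h2 : (decide (x ∉ seen)) = true := by simpa using hns
      simp only [List.filter_cons, h1, h2]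
      exact Nat.lt_succ_of_le (hmono xs)
    · have hn' : n ∈ xs := by
        rcases List.mem_cons.mp hn with h | h
        · exact absurd h.symm hxn
        · exact h
      simp only [List.filter_cons]
      by_cases hx : x ∉ seen ++ [n]
      · have hx2 : x ∉ seen := fun h => hx (List.mem_append.mpr (Or.inl h))
        simp only [hx, decide_true, hx2, List.length_cons]
        exact Nat.succ_lt_succ (ih hn')
      · simp only [hx, decide_false]
        by_cases hx2 : x ∉ seen
        · simp only [hx2, decide_true, List.length_cons]
          exact Nat.lt_succ_of_lt (ih hn')
        · simp only [hx2, decide_false]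
          exact ih hn'

theorem pvKeysLeft_add_lt (groups : List (String × List (String × List String)))
    (seen : PySem.Set String) (n : String)
    (hmem : n ∈ groups.map Prod.fst) (hns : n ∉ seen) :
    pvKeysLeft groups (PySem.Set.add seen n) < pvKeysLeft groups seen := by
  unfold pvKeysLeft
  rw [PySem.Set.add_of_not_mem hns]
  exact pvFilter_append_lt _ seen n hmem hns

theorem pvLookup_isSome_mem {β : Type} {l : List (String × β)} {n : String}
    (h : (List.lookup n l).isSome) : n ∈ l.map Prod.fst := by
  induction l with
  | nil => simp [List.lookup] at h
  | cons p rest ih =>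
    rcases p with ⟨k, v⟩
    by_cases hk : k = n
    · subst hk; exact List.mem_cons_self ..
    · have hbeq : (n == k) = false := beq_eq_false_iff_ne.mpr (Ne.symm hk)
      rw [List.lookup_cons, hbeq] at h
      exact List.mem_cons_of_mem _ (ih h)

-- faithful port of A: normalize, path-set (`seen`) recursion over group members, stable-unique + sort
def pvNormalizeBroad (value : String) : String :=
  let text := PySem.Str.strip value
  if PySem.Str.lower text ∈ (["any", "all", "*"] : List String) then "any" else text

def pvStableUnique (values : List String) : List String :=
  let st := values.foldl
    (fun (st : PySem.Set String × List String) v =>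
      if PySem.Set.contains st.1 v then st else (PySem.Set.add st.1 v, st.2 ++ [v]))
    (PySem.Set.empty, ([] : List String))
  PySem.List.sorted st.2 (fun x => x) false

def pvExpandA (objects : List (String × List (String × String)))
    (groups : List (String × List (String × List String)))
    (name : String) (seen : PySem.Set String) : List String :=
  let normalized := pvNormalizeBroad name
  if normalized = "any" then ["any"]
  else if hseen : normalized ∈ seen then []
  else
    let seen' := PySem.Set.add seen normalized
    match hg : List.lookup normalized groups with
    | some gobj =>
      let members := (List.lookup "members" gobj).getD []
      pvStableUnique (members.flatMap (fun m => pvExpandA objects groups m seen'))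
    | none =>
      match List.lookup normalized objects with
      | some obj =>
        match ["ip-netmask", "fqdn", "ip-range"].findSome? (fun key =>
            match List.lookup key obj with
            | some s => if s ≠ "" then some s else none
            | none => none) with
        | some v => [v]
        | none => [normalized]
      | none => [normalized]
termination_by pvKeysLeft groups seen
decreasing_by
  exact pvKeysLeft_add_lt groups seen (pvNormalizeBroad name)
    (pvLookup_isSome_mem (by rw [hg]; rfl)) hseen

def expand_address (name : String) (objects : List (String × List (String × String))) (groups : List (String × List (String × List String))) (_seen : Option (List String)) : List String :=
  pvExpandA objects groups name
    (match _seen with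
     | none => PySem.Set.empty
     | some l => PySem.Set.ofList l)

-- ===== PORT B =====
def pvResolveLeaf (node : String) (objects : List (String × List (String × String))) : String :=
  match List.lookup node objects with
  | some obj =>
    match ["ip-netmask", "fqdn", "ip-range"].findSome? (fun key =>
        match List.lookup key obj with
        | some s => if s ≠ "" then some s else none
        | none => none) with
    | some v => v
    | none => node
  | none => node

def pvMembers (groups : List (String × List (String × List String))) (g : String) : List String :=
  (List.lookup "members" ((List.lookup g groups).getD [])).getD []

-- one closure round: normalized members of already-reached groups that are unblocked groups themselves
def pvStep (groups : List (String × List (String × List String)))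
    (blocked : PySem.Set String) (reached : PySem.Set String) : PySem.Set String :=
  reached.foldl
    (fun st g =>
      (pvMembers groups g).foldl
        (fun st m =>
          let nm := pvNormalizeBroad m
          if nm ≠ "any" ∧ nm ∉ blocked ∧ (List.lookup nm groups).isSome
          then PySem.Set.add st nm else st)
        st)
    PySem.Set.empty

-- leaf-collection pass over the reached groups
def pvCollect (objects : List (String × List (String × String)))
    (groups : List (String × List (String × List String)))
    (blocked : PySem.Set String) (reached : PySem.Set String) : PySem.Set String :=
  reached.foldl
    (fun vs g =>
      (pvMembers groups g).foldl
        (fun vs m =>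
          let nm := pvNormalizeBroad m
          if nm = "any" then PySem.Set.add vs "any"
          else if nm ∉ blocked ∧ (List.lookup nm groups).isNone
          then PySem.Set.add vs (pvResolveLeaf nm objects) else vs)
        vs)
    PySem.Set.empty

def expand_address_alt (name : String) (objects : List (String × List (String × String))) (groups : List (String × List (String × List String))) (_seen : Option (List String)) : List String :=
  let root := pvNormalizeBroad name
  if root = "any" then ["any"]
  else
    let blocked : PySem.Set String :=
      match _seen with
      | none => PySem.Set.empty
      | some l => PySem.Set.ofList l
    if root ∈ blocked then []
    else if (List.lookup root groups).isNone then [pvResolveLeaf root objects]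
    else
      let reached := (List.range (groups.length + 1)).foldl
        (fun r _ => PySem.Set.union r (pvStep groups blocked r))
        (PySem.Set.add PySem.Set.empty root)
      PySem.List.sorted (pvCollect objects groups blocked reached) (fun x => x) false

-- ===== PRECONDITION & SPEC =====
def Spec_expand_address (name : String) (objects : List (String × List (String × String))) (groups : List (String × List (String × List String))) (_seen : Option (List String)) (out : List String) : Prop := out = expand_address_alt name objects groups _seen
instance (name : String) (objects : List (String × List (String × String))) (groups : List (String × List (String × List String))) (_seen : Option (List String)) (out : List String) : Decidable (Spec_expand_address name objects groups _seen out) := by unfold Spec_expand_address; infer_instance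

-- ===== CLAIM (what is proved, stated in full; the proofs are below) =====
def Claim_equal_expand_address : Prop := ∀ (name : String) (objects : List (String × List (String × String))) (groups : List (String × List (String × List String))) (_seen : Option (List String)), Dom_expand_address name objects groups _seen → Spec_expand_address name objects groups _seen (expand_address name objects groups _seen)

-- ===== LEMMAS AND PROOFS =====

-- Proof-only semantic layer: the member graph of `groups`, walks avoiding a bad set, and the
-- direct leaf contribution of a group.  Both programs' outputs are characterised against it.

def pvEdge (groups : List (String × List (String × List String))) (g h : String) : Prop :=
  (List.lookup h groups).isSome = true ∧ h ≠ "any" ∧ ∃ m ∈ pvMembers groups g, pvNormalizeBroad m = h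

def pvWalk (groups : List (String × List (String × List String))) (bad : String → Prop) :
    String → List String → String → Prop
  | a, [], c => a = c
  | a, h :: t, c => pvEdge groups a h ∧ ¬ bad h ∧ pvWalk groups bad h t c

def pvReach (groups : List (String × List (String × List String))) (bad : String → Prop)
    (a c : String) : Prop :=
  ∃ l, pvWalk groups bad a l c

def pvContrib (objects : List (String × List (String × String)))
    (groups : List (String × List (String × List String))) (S : List String) (g v : String) : Prop :=
  ∃ m ∈ pvMembers groups g,
    (pvNormalizeBroad m = "any" ∧ v = "any") ∨
    (pvNormalizeBroad m ≠ "any" ∧ pvNormalizeBroad m ∉ S ∧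
      List.lookup (pvNormalizeBroad m) groups = none ∧ v = pvResolveLeaf (pvNormalizeBroad m) objects)

def pvAVal (objects : List (String × List (String × String)))
    (groups : List (String × List (String × List String))) (S : List String) (name v : String) : Prop :=
  (pvNormalizeBroad name = "any" ∧ v = "any") ∨
  (pvNormalizeBroad name ≠ "any" ∧ pvNormalizeBroad name ∉ S ∧
    ((List.lookup (pvNormalizeBroad name) groups = none ∧ v = pvResolveLeaf (pvNormalizeBroad name) objects) ∨
     ((List.lookup (pvNormalizeBroad name) groups).isSome = true ∧
       ∃ g', pvReach groups (· ∈ PySem.Set.add S (pvNormalizeBroad name)) (pvNormalizeBroad name) g' ∧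
             pvContrib objects groups (PySem.Set.add S (pvNormalizeBroad name)) g' v)))

theorem pvWalk_mono {groups : List (String × List (String × List String))} {bad bad' : String → Prop}
    (h : ∀ x, bad' x → bad x) :
    ∀ {a : String} {l : List String} {c : String}, pvWalk groups bad a l c → pvWalk groups bad' a l c := by
  intro a l c hw
  induction l generalizing a with
  | nil => exact hw
  | cons x t ih => exact ⟨hw.1, fun hb => hw.2.1 (h x hb), ih hw.2.2⟩

theorem pvWalk_suffix {groups : List (String × List (String × List String))} {bad : String → Prop} :
    ∀ {l₁ : List String} {a x c : String} {l₂ : List String},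
      pvWalk groups bad a (l₁ ++ x :: l₂) c → pvWalk groups bad x l₂ c := by
  intro l₁
  induction l₁ with
  | nil => intro a x c l₂ hw; exact hw.2.2
  | cons y t ih => intro a x c l₂ hw; exact ih hw.2.2

theorem pvWalk_strengthen {groups : List (String × List (String × List String))} {bad : String → Prop}
    (p : String → Prop) :
    ∀ {l : List String} {a c : String},
      pvWalk groups bad a l c → (∀ x ∈ l, ¬ p x) → pvWalk groups (fun y => bad y ∨ p y) a l c := by
  intro l
  induction l with
  | nil => intro a c hw _; exact hw
  | cons x t ih =>
    intro a c hw hp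
    refine ⟨hw.1, ?_, ih hw.2.2 (fun y hy => hp y (List.mem_cons_of_mem _ hy))⟩
    rintro (hb | hpx)
    · exact hw.2.1 hb
    · exact hp x (List.mem_cons_self ..) hpx

theorem pvLastSplit {g : String} : ∀ {l : List String}, g ∈ l →
    ∃ l₁ l₂, l = l₁ ++ g :: l₂ ∧ g ∉ l₂ := by
  intro l hl
  induction l with
  | nil => cases hl
  | cons x t ih =>
    by_cases hgt : g ∈ t
    · obtain ⟨l₁, l₂, rfl, hno⟩ := ih hgt
      exact ⟨x :: l₁, l₂, rfl, hno⟩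
    · have hgx : g = x := by
        rcases List.mem_cons.mp hl with h | h
        · exact h
        · exact absurd h hgt
      subst hgx
      exact ⟨[], t, rfl, hgt⟩

theorem pvWalk_cut {groups : List (String × List (String × List String))} {bad : String → Prop}
    {a c : String} {l : List String} (g : String) (hw : pvWalk groups bad a l c) :
    (∃ l', pvWalk groups (fun y => bad y ∨ y = g) a l' c) ∨
    (∃ l', pvWalk groups (fun y => bad y ∨ y = g) g l' c) := by
  by_cases hg : g ∈ l
  · obtain ⟨l₁, l₂, rfl, hno⟩ := pvLastSplit hg
    exact Or.inr ⟨l₂, pvWalk_strengthen _ (pvWalk_suffix hw) (fun x hx hxg => hno (hxg ▸ hx))⟩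
  · exact Or.inl ⟨l, pvWalk_strengthen _ hw (fun x hx hxg => hg (hxg ▸ hx))⟩

theorem pvReach_cutStart {groups : List (String × List (String × List String))} {bad : String → Prop}
    {g c : String} (h : pvReach groups bad g c) :
    pvReach groups (fun y => bad y ∨ y = g) g c := by
  obtain ⟨l, hw⟩ := h
  rcases pvWalk_cut g hw with ⟨l', h'⟩ | ⟨l', h'⟩
  · exact ⟨l', h'⟩
  · exact ⟨l', h'⟩

theorem pvWalk_peel {groups : List (String × List (String × List String))} {bad : String → Prop}
    {g c : String} {l : List String} (hw : pvWalk groups bad g l c) :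
    c = g ∨ ∃ h t, pvEdge groups g h ∧ ¬ bad h ∧ h ≠ g ∧
      pvWalk groups (fun y => bad y ∨ y = g) h t c := by
  obtain ⟨l', hw'⟩ := pvReach_cutStart ⟨l, hw⟩
  cases l' with
  | nil => exact Or.inl hw'.symm
  | cons h t =>
    obtain ⟨he, hnb, hwt⟩ := hw'
    exact Or.inr ⟨h, t, he, fun hb => hnb (Or.inl hb), fun he2 => hnb (Or.inr he2), hwt⟩

theorem pvWalk_append_one {groups : List (String × List (String × List String))} {bad : String → Prop} :
    ∀ {l : List String} {a b x : String}, pvWalk groups bad a l b →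
      pvEdge groups b x → ¬ bad x → pvWalk groups bad a (l ++ [x]) x := by
  intro l
  induction l with
  | nil =>
    intro a b x hw he hb
    cases hw
    exact ⟨he, hb, rfl⟩
  | cons y t ih => intro a b x hw he hb; exact ⟨hw.1, hw.2.1, ih hw.2.2 he hb⟩

-- generic membership / nodup facts for the accumulation folds of B
theorem pvFoldMem {α : Type} (F : PySem.Set String → α → PySem.Set String) (P : α → String → Prop)
    (h : ∀ s a x, x ∈ F s a ↔ x ∈ s ∨ P a x) :
    ∀ (l : List α) (s0 : PySem.Set String) (x : String),
      x ∈ l.foldl F s0 ↔ x ∈ s0 ∨ ∃ a ∈ l, P a x := by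
  intro l
  induction l with
  | nil => intro s0 x; simp
  | cons a t ih =>
    intro s0 x
    rw [List.foldl_cons, ih, h]
    simp only [List.mem_cons]
    constructor
    · rintro ((hx | hp) | ⟨b, hb, hpb⟩)
      · exact Or.inl hx
      · exact Or.inr ⟨a, Or.inl rfl, hp⟩
      · exact Or.inr ⟨b, Or.inr hb, hpb⟩
    · rintro (hx | ⟨b, (rfl | hb), hpb⟩)
      · exact Or.inl (Or.inl hx)
      · exact Or.inl (Or.inr hpb)
      · exact Or.inr ⟨b, hb, hpb⟩

theorem pvFoldNodup {α : Type} (F : PySem.Set String → α → PySem.Set String)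
    (h : ∀ s a, s.Nodup → (F s a).Nodup) :
    ∀ (l : List α) (s0 : PySem.Set String), s0.Nodup → (l.foldl F s0).Nodup := by
  intro l
  induction l with
  | nil => intro s0 h0; exact h0
  | cons a t ih => intro s0 h0; exact ih _ (h _ _ h0)

theorem pvStep_mem (groups : List (String × List (String × List String)))
    (blocked r : PySem.Set String) (x : String) :
    x ∈ pvStep groups blocked r ↔
      ∃ g ∈ r, ∃ m ∈ pvMembers groups g,
        (pvNormalizeBroad m ≠ "any" ∧ pvNormalizeBroad m ∉ blocked ∧
          (List.lookup (pvNormalizeBroad m) groups).isSome = true) ∧ x = pvNormalizeBroad m := by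
  have hinner : ∀ (s : PySem.Set String) (g : String) (x : String),
      x ∈ (pvMembers groups g).foldl
        (fun st m =>
          let nm := pvNormalizeBroad m
          if nm ≠ "any" ∧ nm ∉ blocked ∧ (List.lookup nm groups).isSome
          then PySem.Set.add st nm else st) s
      ↔ x ∈ s ∨ ∃ m ∈ pvMembers groups g,
          (pvNormalizeBroad m ≠ "any" ∧ pvNormalizeBroad m ∉ blocked ∧
            (List.lookup (pvNormalizeBroad m) groups).isSome = true) ∧ x = pvNormalizeBroad m := by
    intro s g x
    refine pvFoldMem _ (fun m x =>
      (pvNormalizeBroad m ≠ "any" ∧ pvNormalizeBroad m ∉ blocked ∧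
        (List.lookup (pvNormalizeBroad m) groups).isSome = true) ∧ x = pvNormalizeBroad m) ?_ _ s x
    intro s a x
    dsimp only
    split_ifs with hc
    · rw [PySem.Set.mem_add]
      exact ⟨fun h => h.elim Or.inl (fun hx => Or.inr ⟨hc, hx⟩),
             fun h => h.elim Or.inl (fun h2 => h2.2 ▸ Or.inr rfl)⟩
    · constructor
      · intro hx; exact Or.inl hx
      · rintro (hx | ⟨hcond, _⟩)
        · exact hx
        · exact absurd hcond hc
  unfold pvStep
  rw [pvFoldMem _ _ hinner r PySem.Set.empty x]
  simp [PySem.Set.empty]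

theorem pvCollect_mem (objects : List (String × List (String × String)))
    (groups : List (String × List (String × List String)))
    (blocked r : PySem.Set String) (v : String) :
    v ∈ pvCollect objects groups blocked r ↔ ∃ g ∈ r, pvContrib objects groups blocked g v := by
  have hinner : ∀ (s : PySem.Set String) (g : String) (v : String),
      v ∈ (pvMembers groups g).foldl
        (fun vs m =>
          let nm := pvNormalizeBroad m
          if nm = "any" then PySem.Set.add vs "any"
          else if nm ∉ blocked ∧ (List.lookup nm groups).isNone
          then PySem.Set.add vs (pvResolveLeaf nm objects) else vs) s
      ↔ v ∈ s ∨ pvContrib objects groups blocked g v := by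
    intro s g v
    unfold pvContrib
    refine pvFoldMem _ (fun m v =>
      (pvNormalizeBroad m = "any" ∧ v = "any") ∨
      (pvNormalizeBroad m ≠ "any" ∧ pvNormalizeBroad m ∉ blocked ∧
        List.lookup (pvNormalizeBroad m) groups = none ∧
        v = pvResolveLeaf (pvNormalizeBroad m) objects)) ?_ _ s v
    intro s a x
    dsimp only
    split_ifs with h1 h2
    · rw [PySem.Set.mem_add]
      constructor
      · rintro (hx | hx)
        · exact Or.inl hx
        · exact Or.inr (Or.inl ⟨h1, hx⟩)
      · rintro (hx | (⟨_, hx⟩ | ⟨hne, _⟩))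
        · exact Or.inl hx
        · exact Or.inr hx
        · exact absurd h1 hne
    · rw [PySem.Set.mem_add]
      rw [Option.isNone_iff_eq_none] at h2
      constructor
      · rintro (hx | hx)
        · exact Or.inl hx
        · exact Or.inr (Or.inr ⟨h1, h2.1, h2.2, hx⟩)
      · rintro (hx | (⟨ha, _⟩ | ⟨_, _, _, hx⟩))
        · exact Or.inl hx
        · exact absurd ha h1
        · exact Or.inr hx
    · rw [not_and_or, Option.isNone_iff_eq_none] at h2
      constructor
      · intro hx; exact Or.inl hx
      · rintro (hx | (⟨ha, _⟩ | ⟨_, hb, hn, _⟩))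
        · exact hx
        · exact absurd ha h1
        · rcases h2 with h2 | h2
          · exact absurd hb (fun hb' => h2 hb')
          · exact absurd hn h2
  unfold pvCollect
  rw [pvFoldMem _ _ hinner r PySem.Set.empty v]
  simp [PySem.Set.empty]

theorem pvCollect_nodup (objects : List (String × List (String × String)))
    (groups : List (String × List (String × List String)))
    (blocked r : PySem.Set String) : (pvCollect objects groups blocked r).Nodup := by
  unfold pvCollect
  refine pvFoldNodup _ ?_ _ _ List.nodup_nil
  intro s g hs
  refine pvFoldNodup _ ?_ _ _ hs
  intro s m hsn
  dsimp only
  split_ifs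
  · exact PySem.Set.nodup_add _ _ hsn
  · exact PySem.Set.nodup_add _ _ hsn
  · exact hsn

-- A's _stable_unique is sorted(set(values)) (the pair fold tracks the same set twice)
theorem pvPairFold (values : List String) :
    ∀ s : List String,
      values.foldl
        (fun (st : PySem.Set String × List String) v =>
          if PySem.Set.contains st.1 v then st else (PySem.Set.add st.1 v, st.2 ++ [v]))
        (s, s)
      = (values.foldl PySem.Set.add s, values.foldl PySem.Set.add s) := by
  induction values with
  | nil => intro s; rfl
  | cons v t ih =>
    intro s
    rw [List.foldl_cons, List.foldl_cons]
    have hstep : (if PySem.Set.contains s v then (s, s)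
        else (PySem.Set.add s v, s ++ [v])) = (PySem.Set.add s v, PySem.Set.add s v) := by
      by_cases hc : PySem.Set.contains s v
      · rw [if_pos hc]
        have : PySem.Set.add s v = s := PySem.Set.add_of_mem ((PySem.Set.contains_iff _ _).mp hc)
        rw [this]
      · rw [if_neg hc]
        have : PySem.Set.add s v = s ++ [v] :=
          PySem.Set.add_of_not_mem (fun hm => hc ((PySem.Set.contains_iff _ _).mpr hm))
        rw [this]
    rw [hstep, ih]

theorem pvStableUnique_eq (values : List String) :
    pvStableUnique values = PySem.List.sorted (PySem.Set.ofList values) (fun x => x) false := by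
  unfold pvStableUnique
  rw [show ((PySem.Set.empty : PySem.Set String), ([] : List String))
      = (([] : List String), ([] : List String)) from rfl]
  rw [pvPairFold values []]
  rw [PySem.Set.ofList_eq_foldl]

-- moving the start node in / out of the avoided set
theorem pvContrib_mono_add (objects : List (String × List (String × String)))
    (groups : List (String × List (String × List String))) {S : PySem.Set String} {nm g v : String}
    (h : pvContrib objects groups (PySem.Set.add S nm) g v) : pvContrib objects groups S g v := by
  obtain ⟨m, hm, hc⟩ := h
  refine ⟨m, hm, ?_⟩
  rcases hc with hc | ⟨h1, h2, h3, h4⟩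
  · exact Or.inl hc
  · exact Or.inr ⟨h1, fun hx => h2 ((PySem.Set.mem_add _ _ _).mpr (Or.inl hx)), h3, h4⟩

theorem pvContrib_add_group (objects : List (String × List (String × String)))
    (groups : List (String × List (String × List String))) {S : PySem.Set String} {h g v : String}
    (hg : (List.lookup h groups).isSome = true)
    (hc : pvContrib objects groups S g v) : pvContrib objects groups (PySem.Set.add S h) g v := by
  obtain ⟨m, hm, hcc⟩ := hc
  refine ⟨m, hm, ?_⟩
  rcases hcc with hcc | ⟨h1, h2, h3, h4⟩
  · exact Or.inl hcc
  · refine Or.inr ⟨h1, ?_, h3, h4⟩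
    intro hx
    rcases (PySem.Set.mem_add _ _ _).mp hx with hx | hx
    · exact h2 hx
    · rw [← hx, h3] at hg
      simp at hg

theorem pvReach_drop_root (objects : List (String × List (String × String)))
    (groups : List (String × List (String × List String))) (S : PySem.Set String) (nn : String)
    (hg : (List.lookup nn groups).isSome = true) (v : String) :
    (∃ g', pvReach groups (· ∈ PySem.Set.add S nn) nn g' ∧
        pvContrib objects groups (PySem.Set.add S nn) g' v)
    ↔ (∃ g', pvReach groups (· ∈ S) nn g' ∧ pvContrib objects groups S g' v) := by
  constructor
  · rintro ⟨g', ⟨l, hw⟩, hc⟩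
    refine ⟨g', ⟨l, pvWalk_mono (fun x hx => (PySem.Set.mem_add _ _ _).mpr (Or.inl hx)) hw⟩,
      pvContrib_mono_add objects groups hc⟩
  · rintro ⟨g', hr, hc⟩
    refine ⟨g', ?_, ?_⟩
    · obtain ⟨l, hw⟩ := pvReach_cutStart hr
      exact ⟨l, pvWalk_mono (fun x hx => by
        rcases (PySem.Set.mem_add _ _ _).mp hx with hx | hx
        · exact Or.inl hx
        · exact Or.inr hx) hw⟩
    · exact pvContrib_add_group objects groups hg hc

-- branch equations for A's recursion
theorem pvExpandA_any (objects : List (String × List (String × String)))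
    (groups : List (String × List (String × List String))) (name : String) (seen : PySem.Set String)
    (h1 : pvNormalizeBroad name = "any") : pvExpandA objects groups name seen = ["any"] := by
  rw [pvExpandA]
  simp [h1]

theorem pvExpandA_seen (objects : List (String × List (String × String)))
    (groups : List (String × List (String × List String))) (name : String) (seen : PySem.Set String)
    (h1 : pvNormalizeBroad name ≠ "any") (h2 : pvNormalizeBroad name ∈ seen) :
    pvExpandA objects groups name seen = [] := by
  rw [pvExpandA]
  simp [h1, h2]

theorem pvExpandA_leaf (objects : List (String × List (String × String)))
    (groups : List (String × List (String × List String))) (name : String) (seen : PySem.Set String)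
    (h1 : pvNormalizeBroad name ≠ "any") (h2 : pvNormalizeBroad name ∉ seen)
    (hg : List.lookup (pvNormalizeBroad name) groups = none) :
    pvExpandA objects groups name seen = [pvResolveLeaf (pvNormalizeBroad name) objects] := by
  rw [pvExpandA]
  simp only [if_neg h1, dif_neg h2]
  split
  · rename_i gobj heq
    rw [hg] at heq
    cases heq
  · unfold pvResolveLeaf
    cases hE : List.lookup (pvNormalizeBroad name) objects with
    | none => simp only [hE]
    | some obj =>
      simp only [hE]
      split
      · rfl
      · rfl

theorem pvExpandA_group (objects : List (String × List (String × String)))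
    (groups : List (String × List (String × List String))) (name : String) (seen : PySem.Set String)
    (gobj : List (String × List String))
    (h1 : pvNormalizeBroad name ≠ "any") (h2 : pvNormalizeBroad name ∉ seen)
    (hg : List.lookup (pvNormalizeBroad name) groups = some gobj) :
    pvExpandA objects groups name seen
      = pvStableUnique (((List.lookup "members" gobj).getD []).flatMap
          (fun m => pvExpandA objects groups m (PySem.Set.add seen (pvNormalizeBroad name)))) := by
  rw [pvExpandA]
  simp [h1, h2]
  split
  · rename_i gobj2 heq
    rw [hg] at heq
    injection heq with heq2
    subst heq2
    rfl
  · rename_i heq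
    rw [hg] at heq
    cases heq

-- ∃-over-members form of pvAVal equals reach-and-contribute, for a group g already in the avoided set
theorem pvMembers_reach (objects : List (String × List (String × String)))
    (groups : List (String × List (String × List String))) (S : PySem.Set String) (g : String)
    (hgS : g ∈ S) (v : String) :
    (∃ m ∈ pvMembers groups g, pvAVal objects groups S m v) ↔
      ∃ g', pvReach groups (· ∈ S) g g' ∧ pvContrib objects groups S g' v := by
  constructor
  · rintro ⟨m, hm, hAV⟩
    unfold pvAVal at hAV
    rcases hAV with ⟨hany, hv⟩ | ⟨hne, hnS, hrest⟩
    · exact ⟨g, ⟨[], rfl⟩, ⟨m, hm, Or.inl ⟨hany, hv⟩⟩⟩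
    · rcases hrest with ⟨hnone, hv⟩ | ⟨hsome, g', hr, hc⟩
      · exact ⟨g, ⟨[], rfl⟩, ⟨m, hm, Or.inr ⟨hne, hnS, hnone, hv⟩⟩⟩
      · obtain ⟨l, hw⟩ := hr
        refine ⟨g', ⟨pvNormalizeBroad m :: l, ⟨hsome, hne, m, hm, rfl⟩, hnS, ?_⟩,
          pvContrib_mono_add objects groups hc⟩
        exact pvWalk_mono (fun x hx => (PySem.Set.mem_add _ _ _).mpr (Or.inl hx)) hw
  · rintro ⟨g', ⟨l, hw⟩, hc⟩
    rcases pvWalk_peel hw with rfl | ⟨h, t, hE, hnb, _, hwt⟩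
    · obtain ⟨m, hm, hcc⟩ := hc
      refine ⟨m, hm, ?_⟩
      unfold pvAVal
      rcases hcc with ⟨hany, hv⟩ | ⟨hne, hnS, hnone, hv⟩
      · exact Or.inl ⟨hany, hv⟩
      · exact Or.inr ⟨hne, hnS, Or.inl ⟨hnone, hv⟩⟩
    · obtain ⟨hsome, hany, m, hm, hnm⟩ := hE
      refine ⟨m, hm, ?_⟩
      unfold pvAVal
      rw [hnm]
      refine Or.inr ⟨hany, hnb, Or.inr ⟨hsome, g', ?_,
        pvContrib_add_group objects groups hsome hc⟩⟩
      have hwt' : pvWalk groups (· ∈ S) h t g' :=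
        pvWalk_mono (fun x hx => Or.inl hx) hwt
      obtain ⟨t', hw'⟩ := pvReach_cutStart ⟨t, hwt'⟩
      refine ⟨t', pvWalk_mono (fun x hx => ?_) hw'⟩
      rcases (PySem.Set.mem_add _ _ _).mp hx with h1 | h1
      · exact Or.inl h1
      · exact Or.inr h1

-- the characterisation of A's output, by strong induction on the unvisited group keys
theorem pvLA_core (objects : List (String × List (String × String)))
    (groups : List (String × List (String × List String))) (seen : PySem.Set String) (name v : String)
    (IH : ∀ seen' : PySem.Set String, pvKeysLeft groups seen' < pvKeysLeft groups seen →
      ∀ name' v', v' ∈ pvExpandA objects groups name' seen' ↔ pvAVal objects groups seen' name' v') :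
    v ∈ pvExpandA objects groups name seen ↔ pvAVal objects groups seen name v := by
  by_cases h1 : pvNormalizeBroad name = "any"
  · rw [pvExpandA_any objects groups name seen h1]
    unfold pvAVal
    simp [h1]
  · by_cases h2 : pvNormalizeBroad name ∈ seen
    · rw [pvExpandA_seen objects groups name seen h1 h2]
      unfold pvAVal
      simp [h1, h2]
    · rcases hg : List.lookup (pvNormalizeBroad name) groups with _ | gobj
      · rw [pvExpandA_leaf objects groups name seen h1 h2 hg]
        unfold pvAVal
        simp [h1, h2, hg]
      · rw [pvExpandA_group objects groups name seen gobj h1 h2 hg]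
        have hmembers : (List.lookup "members" gobj).getD [] = pvMembers groups (pvNormalizeBroad name) := by
          unfold pvMembers; rw [hg]; rfl
        have hsome : (List.lookup (pvNormalizeBroad name) groups).isSome = true := by rw [hg]; rfl
        have hlt : pvKeysLeft groups (PySem.Set.add seen (pvNormalizeBroad name)) < pvKeysLeft groups seen :=
          pvKeysLeft_add_lt groups seen (pvNormalizeBroad name) (pvLookup_isSome_mem hsome) h2
        have hmemSU : v ∈ pvStableUnique (((List.lookup "members" gobj).getD []).flatMap
              (fun m => pvExpandA objects groups m (PySem.Set.add seen (pvNormalizeBroad name))))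
            ↔ ∃ m ∈ pvMembers groups (pvNormalizeBroad name),
                v ∈ pvExpandA objects groups m (PySem.Set.add seen (pvNormalizeBroad name)) := by
          rw [pvStableUnique_eq, PySem.List.mem_sorted, PySem.Set.mem_ofList, hmembers, List.mem_flatMap]
        rw [hmemSU]
        have e1 : (∃ m ∈ pvMembers groups (pvNormalizeBroad name),
              v ∈ pvExpandA objects groups m (PySem.Set.add seen (pvNormalizeBroad name)))
            ↔ ∃ m ∈ pvMembers groups (pvNormalizeBroad name),
                pvAVal objects groups (PySem.Set.add seen (pvNormalizeBroad name)) m v := by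
          refine exists_congr fun m => and_congr_right fun _ => ?_
          exact IH _ hlt m v
        rw [e1]
        rw [pvMembers_reach objects groups (PySem.Set.add seen (pvNormalizeBroad name))
          (pvNormalizeBroad name) ((PySem.Set.mem_add _ _ _).mpr (Or.inr rfl)) v]
        unfold pvAVal
        simp [h1, h2, hg]

theorem pvLA (objects : List (String × List (String × String)))
    (groups : List (String × List (String × List String))) (seen : PySem.Set String) (name v : String) :
    v ∈ pvExpandA objects groups name seen ↔ pvAVal objects groups seen name v := by
  have H : ∀ (N : Nat) (seen : PySem.Set String), pvKeysLeft groups seen ≤ N →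
      ∀ name v, v ∈ pvExpandA objects groups name seen ↔ pvAVal objects groups seen name v := by
    intro N
    induction N with
    | zero =>
      intro seen hN name v
      refine pvLA_core objects groups seen name v ?_
      intro seen' hlt name' v'
      exact absurd (Nat.lt_of_lt_of_le hlt hN) (Nat.not_lt_zero _)
    | succ N ih =>
      intro seen hN name v
      refine pvLA_core objects groups seen name v ?_
      intro seen' hlt name' v'
      exact ih seen' (by omega) name' v'
  exact H (pvKeysLeft groups seen) seen le_rfl name v

-- B's bounded closure iteration computes exactly the reachable groups
def pvIterF (groups : List (String × List (String × List String))) (blocked : PySem.Set String) :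
    PySem.Set String → PySem.Set String :=
  fun r => PySem.Set.union r (pvStep groups blocked r)

theorem pvFoldRangeIter (groups : List (String × List (String × List String)))
    (blocked : PySem.Set String) :
    ∀ (k : Nat) (r0 : PySem.Set String),
      (List.range k).foldl (fun r _ => PySem.Set.union r (pvStep groups blocked r)) r0
        = (pvIterF groups blocked)^[k] r0 := by
  intro k
  induction k with
  | zero => intro r0; rfl
  | succ k ih =>
    intro r0
    rw [List.range_succ, List.foldl_append, ih, Function.iterate_succ_apply']
    rfl

theorem pvUnion_prefix (s t : PySem.Set String) : s <+: PySem.Set.union s t := by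
  rw [show PySem.Set.union s t = PySem.Set.update s t from rfl, PySem.Set.update_eq_append_filter]
  exact ⟨_, rfl⟩

set_option maxHeartbeats 1600000 in
theorem pvIter_nodup_sub (groups : List (String × List (String × List String)))
    (blocked : PySem.Set String) (root : String) (k : Nat) :
    ((pvIterF groups blocked)^[k] (PySem.Set.add PySem.Set.empty root)).Nodup ∧
      ∀ x ∈ (pvIterF groups blocked)^[k] (PySem.Set.add PySem.Set.empty root),
        x ∈ root :: groups.map Prod.fst := by
  induction k with
  | zero =>
    constructor
    · exact List.nodup_singleton root
    · intro x hx
      rw [show (pvIterF groups blocked)^[0] (PySem.Set.add PySem.Set.empty root)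
          = [root] from rfl] at hx
      rw [List.mem_singleton.mp hx]
      exact List.mem_cons_self ..
  | succ k ih =>
    rw [Function.iterate_succ_apply']
    constructor
    · exact PySem.Set.nodup_union _ _ ih.1
    · intro x hx
      rcases (PySem.Set.mem_union _ _ _).mp hx with hx | hx
      · exact ih.2 x hx
      · obtain ⟨g, _, m, _, ⟨_, _, hsome⟩, rfl⟩ := (pvStep_mem groups blocked _ x).mp hx
        exact List.mem_cons_of_mem _ (pvLookup_isSome_mem hsome)

set_option maxHeartbeats 1600000 in
theorem pvIter_fix (groups : List (String × List (String × List String)))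
    (blocked : PySem.Set String) (root : String) :
    pvIterF groups blocked
        ((pvIterF groups blocked)^[groups.length + 1] (PySem.Set.add PySem.Set.empty root))
      = (pvIterF groups blocked)^[groups.length + 1] (PySem.Set.add PySem.Set.empty root) := by
  by_cases hex : ∃ j, j ≤ groups.length ∧
      pvIterF groups blocked ((pvIterF groups blocked)^[j] (PySem.Set.add PySem.Set.empty root))
        = (pvIterF groups blocked)^[j] (PySem.Set.add PySem.Set.empty root)
  · obtain ⟨j, hj, hfix⟩ := hex
    have hprop : ∀ d, (pvIterF groups blocked)^[j + d] (PySem.Set.add PySem.Set.empty root)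
        = (pvIterF groups blocked)^[j] (PySem.Set.add PySem.Set.empty root) := by
      intro d
      induction d with
      | zero => rfl
      | succ d ihd =>
        rw [show j + (d + 1) = (j + d) + 1 from rfl, Function.iterate_succ_apply', ihd, hfix]
    have h1 : (pvIterF groups blocked)^[groups.length + 1] (PySem.Set.add PySem.Set.empty root)
        = (pvIterF groups blocked)^[j] (PySem.Set.add PySem.Set.empty root) := by
      have h2 := hprop (groups.length + 1 - j)
      rw [show j + (groups.length + 1 - j) = groups.length + 1 by omega] at h2
      exact h2
    rw [h1, hfix]
  · exfalso
    push_neg at hex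
    have hgrow : ∀ j, j ≤ groups.length + 1 →
        j + 1 ≤ ((pvIterF groups blocked)^[j] (PySem.Set.add PySem.Set.empty root)).length := by
      intro j
      induction j with
      | zero => intro _; exact le_rfl
      | succ j ihj =>
        intro hj
        have hne := hex j (by omega)
        have hpre : (pvIterF groups blocked)^[j] (PySem.Set.add PySem.Set.empty root)
            <+: (pvIterF groups blocked)^[j + 1] (PySem.Set.add PySem.Set.empty root) := by
          rw [Function.iterate_succ_apply']
          exact pvUnion_prefix _ _
        have hlt : ((pvIterF groups blocked)^[j] (PySem.Set.add PySem.Set.empty root)).length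
            < ((pvIterF groups blocked)^[j + 1] (PySem.Set.add PySem.Set.empty root)).length := by
          refine Nat.lt_of_le_of_ne hpre.length_le ?_
          intro hlen
          have heq := List.IsPrefix.eq_of_length hpre hlen
          rw [Function.iterate_succ_apply'] at heq
          exact hne heq.symm
        have := ihj (by omega)
        omega
    have hbound : ((pvIterF groups blocked)^[groups.length + 1]
        (PySem.Set.add PySem.Set.empty root)).length ≤ groups.length + 1 := by
      obtain ⟨hnd, hsub⟩ := pvIter_nodup_sub groups blocked root (groups.length + 1)
      calc ((pvIterF groups blocked)^[groups.length + 1] (PySem.Set.add PySem.Set.empty root)).length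
          = ((pvIterF groups blocked)^[groups.length + 1] (PySem.Set.add PySem.Set.empty root)).toFinset.card :=
            (List.toFinset_card_of_nodup hnd).symm
        _ ≤ (root :: groups.map Prod.fst).toFinset.card :=
            Finset.card_le_card (fun x hx => List.mem_toFinset.mpr (hsub x (List.mem_toFinset.mp hx)))
        _ = (root :: groups.map Prod.fst).dedup.length := List.card_toFinset _
        _ ≤ (root :: groups.map Prod.fst).length := (List.dedup_sublist _).length_le
        _ = groups.length + 1 := by simp
    have := hgrow (groups.length + 1) le_rfl
    omega

set_option maxHeartbeats 1600000 in
theorem pvReached_mem (groups : List (String × List (String × List String)))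
    (blocked : PySem.Set String) (root x : String) :
    x ∈ (pvIterF groups blocked)^[groups.length + 1] (PySem.Set.add PySem.Set.empty root)
      ↔ pvReach groups (· ∈ blocked) root x := by
  constructor
  · have hsound : ∀ (k : Nat) (y : String),
        y ∈ (pvIterF groups blocked)^[k] (PySem.Set.add PySem.Set.empty root) →
          pvReach groups (· ∈ blocked) root y := by
      intro k
      induction k with
      | zero =>
        intro y hy
        rw [show (pvIterF groups blocked)^[0] (PySem.Set.add PySem.Set.empty root)
            = [root] from rfl] at hy
        rw [List.mem_singleton.mp hy]
        exact ⟨[], rfl⟩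
      | succ k ih =>
        intro y hy
        rw [Function.iterate_succ_apply'] at hy
        rcases (PySem.Set.mem_union _ _ _).mp hy with hy | hy
        · exact ih y hy
        · obtain ⟨g, hgR, m, hm, ⟨hne, hnb, hsome⟩, rfl⟩ :=
            (pvStep_mem groups blocked _ y).mp hy
          obtain ⟨l, hw⟩ := ih g hgR
          exact ⟨l ++ [pvNormalizeBroad m], pvWalk_append_one hw ⟨hsome, hne, m, hm, rfl⟩ hnb⟩
    exact hsound _ x
  · rintro ⟨l, hw⟩
    have hroot : root ∈ (pvIterF groups blocked)^[groups.length + 1]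
        (PySem.Set.add PySem.Set.empty root) := by
      have hpre : ∀ k : Nat, (PySem.Set.add PySem.Set.empty root)
          <+: (pvIterF groups blocked)^[k] (PySem.Set.add PySem.Set.empty root) := by
        intro k
        induction k with
        | zero => exact List.prefix_rfl
        | succ k ih =>
          rw [Function.iterate_succ_apply']
          exact ih.trans (pvUnion_prefix _ _)
      exact (hpre _).subset (List.mem_singleton.mpr rfl)
    have hclosed := pvIter_fix groups blocked root
    have hwalk : ∀ (l : List String) (a : String),
        a ∈ (pvIterF groups blocked)^[groups.length + 1] (PySem.Set.add PySem.Set.empty root) →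
        pvWalk groups (· ∈ blocked) a l x →
        x ∈ (pvIterF groups blocked)^[groups.length + 1] (PySem.Set.add PySem.Set.empty root) := by
      intro l
      induction l with
      | nil =>
        intro a ha hw
        rw [show a = x from hw] at ha
        exact ha
      | cons h t ih =>
        intro a ha hw
        obtain ⟨⟨hsome, hne, m, hm, hnm⟩, hnb, hwt⟩ := hw
        subst hnm
        have hh : pvNormalizeBroad m ∈ (pvIterF groups blocked)^[groups.length + 1]
            (PySem.Set.add PySem.Set.empty root) := by
          have hstep : pvNormalizeBroad m ∈ pvStep groups blocked
              ((pvIterF groups blocked)^[groups.length + 1] (PySem.Set.add PySem.Set.empty root)) :=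
            (pvStep_mem groups blocked _ (pvNormalizeBroad m)).mpr
              ⟨a, ha, m, hm, ⟨hne, hnb, hsome⟩, rfl⟩
          have hu : pvNormalizeBroad m ∈ pvIterF groups blocked
              ((pvIterF groups blocked)^[groups.length + 1] (PySem.Set.add PySem.Set.empty root)) :=
            (PySem.Set.mem_union _ _ _).mpr (Or.inr hstep)
          rw [hclosed] at hu
          exact hu
        exact ih _ hh hwt
    exact hwalk l root hroot hw

-- ===== VERDICT (by name: the statement is the Claim_ definition above) =====
set_option maxHeartbeats 1600000 in
theorem pvMainCore (objects : List (String × List (String × String)))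
    (groups : List (String × List (String × List String))) (name : String) (S0 : PySem.Set String) :
    pvExpandA objects groups name S0 =
      (if pvNormalizeBroad name = "any" then ["any"]
       else if pvNormalizeBroad name ∈ S0 then []
       else if (List.lookup (pvNormalizeBroad name) groups).isNone = true then
         [pvResolveLeaf (pvNormalizeBroad name) objects]
       else PySem.List.sorted (pvCollect objects groups S0
         (List.foldl (fun r _ => PySem.Set.union r (pvStep groups S0 r))
           (PySem.Set.add PySem.Set.empty (pvNormalizeBroad name))
           (List.range (groups.length + 1)))) (fun x => x) false) := by
  by_cases h1 : pvNormalizeBroad name = "any"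
  · rw [pvExpandA_any objects groups name S0 h1, if_pos h1]
  · rw [if_neg h1]
    by_cases h2 : pvNormalizeBroad name ∈ S0
    · rw [pvExpandA_seen objects groups name S0 h1 h2, if_pos h2]
    · rw [if_neg h2]
      rcases hg : List.lookup (pvNormalizeBroad name) groups with _ | gobj
      · rw [pvExpandA_leaf objects groups name S0 h1 h2 hg, if_pos (by rfl)]
      · rw [pvExpandA_group objects groups name S0 gobj h1 h2 hg,
          if_neg (by simp)]
        have hsome : (List.lookup (pvNormalizeBroad name) groups).isSome = true := by rw [hg]; rfl
        rw [pvFoldRangeIter groups S0 (groups.length + 1)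
          (PySem.Set.add PySem.Set.empty (pvNormalizeBroad name))]
        rw [pvStableUnique_eq]
        refine PySem.List.sorted_eq_sorted_of_perm _ _ _ (fun a b h => h) ?_
        refine (List.perm_ext_iff_of_nodup (PySem.Set.nodup_ofList _)
          (pvCollect_nodup objects groups S0 _)).mpr ?_
        intro v
        rw [PySem.Set.mem_ofList, List.mem_flatMap]
        have hmembers : (List.lookup "members" gobj).getD []
            = pvMembers groups (pvNormalizeBroad name) := by
          unfold pvMembers; rw [hg]; rfl
        have e1 : (∃ m ∈ (List.lookup "members" gobj).getD [],
              v ∈ pvExpandA objects groups m (PySem.Set.add S0 (pvNormalizeBroad name)))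
            ↔ ∃ m ∈ pvMembers groups (pvNormalizeBroad name),
                pvAVal objects groups (PySem.Set.add S0 (pvNormalizeBroad name)) m v := by
          rw [hmembers]
          exact exists_congr fun m => and_congr_right fun _ => pvLA objects groups _ m v
        rw [e1,
          pvMembers_reach objects groups (PySem.Set.add S0 (pvNormalizeBroad name))
            (pvNormalizeBroad name) ((PySem.Set.mem_add _ _ _).mpr (Or.inr rfl)) v,
          pvReach_drop_root objects groups S0 (pvNormalizeBroad name) hsome v,
          pvCollect_mem objects groups S0 _ v]
        exact exists_congr fun g' => and_congr_left fun _ =>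
          (pvReached_mem groups S0 (pvNormalizeBroad name) g').symm

theorem expand_address_spec : Claim_equal_expand_address := by
  unfold Claim_equal_expand_address
  intro name objects groups _seen _hdom
  unfold Spec_expand_address expand_address expand_address_alt
  cases _seen with
  | none => exact pvMainCore objects groups name PySem.Set.empty
  | some l => exact pvMainCore objects groups name (PySem.Set.ofList l)
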